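-- pv_equiv track=rewrite | github.com/AMASS-MORU/AMASSv2.0 | Programs/AMASS_data/AMASS_report_data_function_version_2.py | correct_content_page_v2
-- ===== SOURCE A (Python) =====
-- def correct_content_page_v2(lst_page):
--     lst_page_correct = []
--     for x in range(len(lst_page)):
--         z = 0
--         if x == 0:
--             z = lst_page[x]
--         else:
--             z = 1 + sum(lst_page[:x])
--         lst_page_correct.append(z)
--     return lst_page_correct
-- ===== SOURCE B (Python) =====
-- def correct_content_page_v2(lst_page):
--     out = []
--     s = 0
--     for i, v in enumerate(lst_page):
--         out.append(v if i == 0 else 1 + s)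
--         s += v
--     return out
-- ===== Notes on version B (the rewrite author's own statement) =====
-- stated objective: faster
-- what changed: replaced per-index re-summation of lst_page[:x] with a single pass that maintains a running prefix sum
import Mathlib
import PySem

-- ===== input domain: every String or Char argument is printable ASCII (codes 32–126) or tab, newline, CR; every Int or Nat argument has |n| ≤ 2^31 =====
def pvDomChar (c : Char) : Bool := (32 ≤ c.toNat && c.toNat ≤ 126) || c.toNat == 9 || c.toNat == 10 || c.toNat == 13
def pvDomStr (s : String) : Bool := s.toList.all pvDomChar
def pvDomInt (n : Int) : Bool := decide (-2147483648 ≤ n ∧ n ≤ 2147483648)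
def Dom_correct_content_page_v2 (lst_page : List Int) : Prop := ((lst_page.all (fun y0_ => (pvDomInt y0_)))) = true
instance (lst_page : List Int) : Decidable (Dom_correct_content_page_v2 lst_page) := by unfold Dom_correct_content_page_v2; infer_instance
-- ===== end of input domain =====

-- ===== PORT A =====
-- faithful port of A: for each index x, 0 appends lst_page[0], else 1 + sum(lst_page[:x]);
-- pyGetD with default 0 is exact here: x = 0 is in range whenever the loop body runs
def correct_content_page_v2 (lst_page : List Int) : List Int :=
  (PySem.List.pyRange 0 (lst_page.length : Int) 1).foldl
    (fun acc x =>
      let z : Int :=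
        if x == 0 then PySem.List.pyGetD lst_page x 0
        else 1 + (PySem.List.slice lst_page none (some x)).sum
      acc ++ [z]) []

-- ===== PORT B =====
-- port of B: one pass over enumerate(lst_page) carrying (out, running sum s)
def correct_content_page_v2_alt (lst_page : List Int) : List Int :=
  ((PySem.List.enumerate lst_page 0).foldl
    (fun (p : List Int × Int) (iv : Int × Int) =>
      (p.1 ++ [if iv.1 == 0 then iv.2 else 1 + p.2], p.2 + iv.2))
    ([], 0)).1

-- ===== PRECONDITION & SPEC =====
def Spec_correct_content_page_v2 (lst_page : List Int) (out : List Int) : Prop := out = correct_content_page_v2_alt lst_page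
instance (lst_page : List Int) (out : List Int) : Decidable (Spec_correct_content_page_v2 lst_page out) := by unfold Spec_correct_content_page_v2; infer_instance

-- ===== CLAIM (what is proved, stated in full; the proofs are below) =====
def Claim_equal_correct_content_page_v2 : Prop := ∀ (lst_page : List Int), Dom_correct_content_page_v2 lst_page → Spec_correct_content_page_v2 lst_page (correct_content_page_v2 lst_page)

-- ===== LEMMAS AND PROOFS =====

-- ===== VERDICT (by name: the statement is the Claim_ definition above) =====
-- the common closed description: position k holds lst[0] if k = 0, else 1 + sum of the first k elements
def pvRow (lst : List Int) (s : Int) (i k : Nat) : Int :=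
  if i + k = 0 then lst.getD k 0 else 1 + s + (lst.take k).sum

lemma bGo (lst : List Int) (acc : List Int) (s : Int) (i : Nat) :
    ((PySem.List.enumerate lst (i : Int)).foldl
      (fun (p : List Int × Int) (iv : Int × Int) =>
        (p.1 ++ [if iv.1 == 0 then iv.2 else 1 + p.2], p.2 + iv.2))
      (acc, s)).1
    = acc ++ (List.range lst.length).map (pvRow lst s i) := by
  induction lst generalizing acc s i with
  | nil => simp [PySem.List.enumerate_nil]
  | cons h t ih =>
    rw [PySem.List.enumerate_cons]
    simp only [List.foldl_cons]
    have : ((i : Int) + 1) = ((i + 1 : Nat) : Int) := by push_cast; ring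
    rw [this, ih]
    simp only [List.length_cons, List.range_succ_eq_map, List.map_cons, List.map_map]
    rw [List.append_assoc]
    congr 1
    simp [pvRow]
    intro a _
    ring

lemma aEq (lst : List Int) :
    correct_content_page_v2 lst
    = (List.range lst.length).map (pvRow lst 0 0) := by
  unfold correct_content_page_v2
  rw [PySem.List.foldl_append_singleton_eq_map, PySem.List.pyRange_one]
  simp only [Int.sub_zero, Int.toNat_natCast, List.map_map, List.nil_append]
  congr 1
  funext k
  simp only [Function.comp, pvRow, Nat.zero_add, Int.zero_add, beq_iff_eq, Nat.cast_eq_zero]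
  by_cases hk : k = 0
  · subst hk
    simp [PySem.List.pyGetD_zero]
  · rw [if_neg hk, if_neg hk, PySem.List.slice_to_natCast]
    simp

theorem correct_content_page_v2_spec : Claim_equal_correct_content_page_v2 := by
  intro lst _
  unfold Spec_correct_content_page_v2 correct_content_page_v2_alt
  have := bGo lst [] 0 0
  simp only [Nat.cast_zero] at this
  rw [this, aEq lst]
  simp
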